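-- pv_equiv track=rewrite | github.com/Spooore/padt1 | delete_annotations.py | transform_document
-- ===== SOURCE A (Python) =====
-- def search_for_braces(document):
--     i = 0
--     opening = list()
--     closing = list()
--     while i != -1:
--         i = document.find('<', i)
--         opening.append(i)
--         if i == -1:
--             closing.append(-1)
--             break
--         i = document.find('>', i)
--         closing.append(i)
--     return(opening, closing)
--
-- def transform_document(document):
--     opening, closing = search_for_braces(document)
--     closing.insert(0, -1)
--     del closing[-1]
--     opening[-1] = len(document)
--     clean_document = ""
--     for opn, cls in zip(opening, closing):
--         clean_document = clean_document + document[(cls+1):opn]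
--     clean_document.replace(u'\xa0', ' ')
--     return(clean_document)
-- ===== SOURCE B (Python) =====
-- def transform_document(document):
--     # One-pass state machine: text outside <...> goes to out; once a '<' is
--     # seen, characters buffer into pending until the closing '>' drops the tag;
--     # an unclosed trailing '<...' is kept verbatim, as A keeps it.
--     out = []
--     pending = None
--     for ch in document:
--         if pending is None:
--             if ch == '<':
--                 pending = [ch]
--             else:
--                 out.append(ch)
--         else:
--             if ch == '>':
--                 pending = None  # tag complete, drop it
--             else:
--                 pending.append(ch)
--     if pending is not None:
--         out.extend(pending)
--     return ''.join(out)
-- ===== Notes on version B (the rewrite author's own statement) =====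
-- stated objective: simpler
-- what changed: Replaces A's two-phase design (a find()-based scan collecting opening/closing index lists, then insert/delete/last-element surgery on those lists and a zip of slices) with a single character-by-character state machine that copies text outside tags and buffers a possibly-unclosed tag.
import Mathlib
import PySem

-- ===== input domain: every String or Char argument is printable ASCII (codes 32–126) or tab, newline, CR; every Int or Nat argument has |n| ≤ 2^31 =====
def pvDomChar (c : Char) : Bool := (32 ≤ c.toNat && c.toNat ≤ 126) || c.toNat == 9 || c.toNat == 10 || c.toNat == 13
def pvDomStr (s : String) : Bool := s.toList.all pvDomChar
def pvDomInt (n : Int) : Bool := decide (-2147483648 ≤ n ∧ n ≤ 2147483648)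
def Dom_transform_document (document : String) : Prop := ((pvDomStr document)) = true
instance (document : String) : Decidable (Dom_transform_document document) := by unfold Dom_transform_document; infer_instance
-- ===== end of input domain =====

-- B replaces A's find()-index-list bookkeeping (collect brace indices, patch the lists,
-- concatenate slices) with a single character-by-character state machine; same cost.

-- ===== PORT A =====
-- search_for_braces's while loop: each pass appends one element to `opening` and one to
-- `closing`; ported as a recursion emitting those elements in the same order.  `fuel`
-- only bounds the number of passes (the loop's search index strictly increases, so
-- `len + 2` passes always suffice); it changes no computed value.
def pvSfbLoop (s : List Char) (fuel : Nat) (i : Int) : List Int × List Int :=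
  match fuel with
  | 0 => ([], [])
  | fuel + 1 =>
    if i = -1 then ([], [])
    else
      let j := PySem.Chars.findFrom s ['<'] i none
      if j = -1 then ([j], [-1])
      else
        let k := PySem.Chars.findFrom s ['>'] j none
        let rest := pvSfbLoop s fuel k
        (j :: rest.1, k :: rest.2)


-- opening[-1] = v  (opening is never empty: the loop's first pass always appends)
def pvSetLast (l : List Int) (v : Int) : List Int := l.dropLast ++ [v]

def search_for_braces (s : List Char) : List Int × List Int :=
  pvSfbLoop s (s.length + 2) 0

def transform_document (document : String) : String :=
  let s := document.toList
  let oc := search_for_braces s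
  let closing := (-1 :: oc.2).dropLast            -- closing.insert(0, -1); del closing[-1]
  let opening := pvSetLast oc.1 (s.length : Int)  -- opening[-1] = len(document)
  -- for opn, cls in zip(opening, closing): clean_document += document[(cls+1):opn]
  let clean := (opening.zip closing).foldl
    (fun acc oc => acc ++ PySem.List.slice s (some (oc.2 + 1)) (some oc.1)) []
  -- clean_document.replace(u'\xa0', ' ') : result discarded by A, so nothing to port
  String.ofList clean

-- ===== PORT B =====
-- state = (out, pending): pending = none outside a tag, some buf inside one
def pvAltStep (st : List Char × Option (List Char)) (ch : Char) :
    List Char × Option (List Char) :=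
  match st.2 with
  | none => if ch = '<' then (st.1, some [ch]) else (st.1 ++ [ch], none)
  | some p => if ch = '>' then (st.1, none) else (st.1, some (p ++ [ch]))


def transform_document_alt (document : String) : String :=
  let st := document.toList.foldl pvAltStep ([], none)
  match st.2 with
  | none => String.ofList st.1
  | some p => String.ofList (st.1 ++ p)   -- out.extend(pending): unclosed tag kept

-- ===== PRECONDITION & SPEC =====
def Spec_transform_document (document : String) (out : String) : Prop := out = transform_document_alt document
instance (document : String) (out : String) : Decidable (Spec_transform_document document out) := by unfold Spec_transform_document; infer_instance

-- ===== CLAIM (what is proved, stated in full; the proofs are below) =====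
def Claim_equal_transform_document : Prop := ∀ (document : String), Dom_transform_document document → Spec_transform_document document (transform_document document)

-- ===== LEMMAS AND PROOFS =====
-- Both ports are reduced to the same functional specification `pvStrip`: drop each
-- '<'…first-'>' span, keep an unclosed '<…' tail verbatim.
def pvCut : List Char → Option (List Char)
  | [] => none
  | d :: ds => if d = '>' then some ds else pvCut ds

theorem pvCut_length : ∀ {l r : List Char}, pvCut l = some r → r.length < l.length := by
  intro l
  induction l with
  | nil => intro r h; simp [pvCut] at h
  | cons d ds ih =>
    intro r h
    simp only [pvCut] at h
    by_cases hd : d = '>'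
    · simp [hd] at h; subst h; simp
    · simp [hd] at h; exact Nat.lt_succ_of_lt (ih h)

def pvStrip : List Char → List Char
  | [] => []
  | c :: cs =>
    if c = '<' then
      match hc : pvCut cs with
      | some rest => pvStrip rest
      | none => c :: cs
    else c :: pvStrip cs
termination_by l => l.length
decreasing_by
  · exact Nat.lt_succ_of_lt (pvCut_length hc)
  · simp

theorem pvStrip_append_no_open : ∀ {xs ys : List Char}, (∀ c ∈ xs, c ≠ '<') →
    pvStrip (xs ++ ys) = xs ++ pvStrip ys := by
  intro xs
  induction xs with
  | nil => simp
  | cons x xs ih =>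
    intro ys h
    have hx : x ≠ '<' := h x (by simp)
    rw [List.cons_append, pvStrip, if_neg hx, ih (fun c hc => h c (by simp [hc]))]; simp

theorem pvStrip_no_open : ∀ {l : List Char}, (∀ c ∈ l, c ≠ '<') → pvStrip l = l := by
  intro l h
  have := pvStrip_append_no_open (ys := []) h
  simpa [pvStrip] using this

theorem pvCut_no_close : ∀ {l : List Char}, (∀ c ∈ l, c ≠ '>') → pvCut l = none := by
  intro l
  induction l with
  | nil => intro; rfl
  | cons d ds ih =>
    intro h
    rw [pvCut, if_neg (h d (by simp)), ih (fun c hc => h c (by simp [hc]))]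

theorem pvCut_append_close : ∀ {xs ys : List Char}, (∀ c ∈ xs, c ≠ '>') →
    pvCut (xs ++ '>' :: ys) = some ys := by
  intro xs
  induction xs with
  | nil => intro ys _; simp [pvCut]
  | cons x xs ih =>
    intro ys h
    rw [List.cons_append, pvCut, if_neg (h x (by simp)), ih (fun c hc => h c (by simp [hc]))]

theorem pvStrip_open : ∀ {cs : List Char}, pvStrip ('<' :: cs) =
    (match pvCut cs with | some rest => pvStrip rest | none => '<' :: cs) := by
  intro cs; rw [pvStrip]; rcases h : pvCut cs with _ | r <;> simp [h]

theorem pvStrip_cons_ne : ∀ {c : Char} {cs : List Char}, c ≠ '<' →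
    pvStrip (c :: cs) = c :: pvStrip cs := by
  intro c cs h; rw [pvStrip, if_neg h]


-- single-char prefix of a drop = character at that index
theorem pvPrefix_drop (s : List Char) (c : Char) (n : Nat) :
    [c] <+: s.drop n ↔ s[n]? = some c := by
  rw [← List.head?_drop]
  constructor
  · rintro ⟨u, hu⟩; rw [← hu]; simp
  · intro h
    rcases hd : s.drop n with _ | ⟨d, ds⟩
    · rw [hd] at h; simp at h
    · rw [hd] at h; simp at h; subst h; exact ⟨ds, by simp [hd]⟩

-- characterisation of Chars.find for a single character
theorem pvFind_found (s : List Char) (c : Char) (h : PySem.Chars.find s [c] ≠ -1) :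
    0 ≤ PySem.Chars.find s [c] ∧
    s[(PySem.Chars.find s [c]).toNat]? = some c ∧
    ∀ m < (PySem.Chars.find s [c]).toNat, s[m]? ≠ some c := by
  have h0 : 0 ≤ PySem.Chars.find s [c] := by
    have := PySem.Chars.neg_one_le_find s [c]; omega
  obtain ⟨h1, h2⟩ := PySem.Chars.find_spec h0
  refine ⟨h0, (pvPrefix_drop s c _).mp h1, fun m hm hc => h2 m hm ((pvPrefix_drop s c m).mpr hc)⟩

theorem pvFind_none (s : List Char) (c : Char) (h : PySem.Chars.find s [c] = -1) :
    c ∉ s := by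
  have := (PySem.Chars.find_eq_neg_one_iff s [c]).mp h
  exact fun hc => this ((List.singleton_infix_iff c s).mpr hc)

-- decomposition of a drop at a known character position
theorem pvDecomp (s : List Char) (p m : Nat) (hpm : p ≤ m) (hm : m < s.length) :
    s.drop p = (s.drop p).take (m - p) ++ s[m] :: s.drop (m + 1) := by
  conv_lhs => rw [← List.take_append_drop (m - p) (s.drop p)]
  congr 1
  rw [List.drop_drop]
  have h2 : p + (m - p) = m := by omega
  rw [h2, List.drop_eq_getElem_cons hm]

theorem pvMemTake (s : List Char) (p m : Nat) (c : Char) (hc : c ∈ (s.drop p).take (m - p)) :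
    ∃ idx, p ≤ idx ∧ idx < m ∧ s[idx]? = some c := by
  obtain ⟨q, hq, he⟩ := List.mem_iff_getElem.mp hc
  have hq2 : q < (s.drop p).length ⊓ (m - p) := by simpa [List.length_take, Nat.min_comm] using hq
  have hq' : q < m - p := lt_of_lt_of_le hq2 (by omega)
  have hlen : q < (s.drop p).length := lt_of_lt_of_le hq2 (by omega)
  have hps : p + q < s.length := by simp at hlen; omega
  refine ⟨p + q, by omega, by omega, ?_⟩
  rw [List.getElem?_eq_getElem hps]
  rw [List.getElem_take] at he
  rw [List.getElem_drop] at he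
  exact congrArg some he


def pvFin (st : List Char × Option (List Char)) : List Char :=
  match st.2 with
  | none => st.1
  | some p => st.1 ++ p

theorem pvAlt_run : ∀ (cs : List Char),
    (∀ out, pvFin (cs.foldl pvAltStep (out, none)) = out ++ pvStrip cs) ∧
    (∀ out p, pvFin (cs.foldl pvAltStep (out, some p)) =
      match pvCut cs with
      | some r => out ++ pvStrip r
      | none => out ++ p ++ cs) := by
  intro cs
  induction cs with
  | nil => exact ⟨fun out => by simp [pvFin, pvStrip], fun out p => by simp [pvFin, pvCut]⟩
  | cons c cs ih =>
    constructor
    · intro out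
      rw [List.foldl_cons]
      by_cases hc : c = '<'
      · subst hc
        show pvFin (cs.foldl pvAltStep (out, some ['<'])) = _
        rw [ih.2 out ['<'], pvStrip_open]
        rcases h : pvCut cs with _ | r <;> simp [h]
      · rw [show pvAltStep (out, none) c = (out ++ [c], none) by simp [pvAltStep, hc]]
        rw [ih.1 (out ++ [c]), pvStrip_cons_ne hc]; simp
    · intro out p
      rw [List.foldl_cons]
      by_cases hc : c = '>'
      · subst hc
        rw [show pvAltStep (out, some p) '>' = (out, none) by simp [pvAltStep]]
        rw [ih.1 out]
        simp [pvCut]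
      · rw [show pvAltStep (out, some p) c = (out, some (p ++ [c])) by simp [pvAltStep, hc]]
        rw [ih.2 out (p ++ [c])]
        rw [show pvCut (c :: cs) = pvCut cs by simp [pvCut, hc]]
        rcases h : pvCut cs with _ | r <;> simp [h]


def pvSegs (s : List Char) (p : Nat) (oc : List Int × List Int) : List Char :=
  ((pvSetLast oc.1 (s.length : Int)).zip (((p : Int) - 1) :: oc.2.dropLast)).flatMap
    (fun t => PySem.List.slice s (some (t.2 + 1)) (some t.1))

theorem pvSfbLoop_neg_one (s : List Char) (fuel : Nat) :
    pvSfbLoop s fuel (-1) = ([], []) := by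
  cases fuel <;> simp [pvSfbLoop]

theorem pvSfbLoop_ne_nil (s : List Char) (fuel : Nat) (i : Int) (h : i ≠ -1) :
    (pvSfbLoop s (fuel + 1) i).1 ≠ [] ∧ (pvSfbLoop s (fuel + 1) i).2 ≠ [] := by
  rw [pvSfbLoop]
  simp only [if_neg h]
  split_ifs <;> simp

-- the one self-terminating drop-p slice
theorem pvSegs_tail (s : List Char) (p : Nat) (hp : p ≤ s.length) (j : Int) :
    pvSegs s p ([j], [-1]) = s.drop p := by
  simp only [pvSegs, pvSetLast]
  simp only [List.dropLast_singleton, List.nil_append, List.zip_cons_cons,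
    List.zip_nil_right, List.flatMap_cons, List.flatMap_nil, List.append_nil]
  rw [show ((p : Int) - 1 + 1) = (p : Int) by omega]
  rw [PySem.List.slice_natCast]
  exact List.take_of_length_le (by simp)

theorem pvMain : ∀ (fuel : Nat) (s : List Char) (p i : Nat), i ≤ p → p ≤ s.length →
    (∀ m, i ≤ m → m < p → s[m]? ≠ some '<') → s.length - i < fuel →
    pvSegs s p (pvSfbLoop s fuel (i : Int)) = pvStrip (s.drop p) := by
  intro fuel
  induction fuel with
  | zero => intro s p i _ hps _ hf; omega
  | succ fuel ih =>
    intro s p i hip hps hno hf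
    have hi0 : ¬((i : Int) = -1) := by omega
    have hfi : PySem.Chars.findFrom s ['<'] (i : Int) none =
        if PySem.Chars.find (s.drop i) ['<'] = -1 then -1
        else (i : Int) + PySem.Chars.find (s.drop i) ['<'] :=
      PySem.Chars.findFrom_natCast s ['<'] i (le_trans hip hps)
    set f := PySem.Chars.find (s.drop i) ['<'] with hfdef
    by_cases hf1 : f = -1
    · -- no further '<': the loop records (-1, -1); result is the tail slice s[p:]
      rw [pvSfbLoop]
      simp only [if_neg hi0, hfi, if_pos hf1, if_true]
      rw [pvSegs_tail s p hps]
      symm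
      apply pvStrip_no_open
      intro c hc hceq
      subst hceq
      apply pvFind_none _ _ hf1
      have : s.drop p = (s.drop i).drop (p - i) := by
        rw [List.drop_drop]; congr 1; omega
      rw [this] at hc
      exact List.mem_of_mem_drop hc
    · obtain ⟨hf0, hfat, hfmin⟩ := pvFind_found (s.drop i) '<' hf1
      set jn : Nat := i + f.toNat with hjn
      have hj : (i : Int) + f = (jn : Int) := by omega
      have hsj : s[jn]? = some '<' := by
        rw [List.getElem?_drop] at hfat; exact hfat
      have hjlen : jn < s.length := (List.getElem?_eq_some_iff.mp hsj).1
      have hpj : p ≤ jn := by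
        by_contra h'
        exact hno jn (by omega) (by omega) hsj
      have hming : ∀ m, i ≤ m → m < jn → s[m]? ≠ some '<' := by
        intro m h1 h2 hceq
        apply hfmin (m - i) (by omega)
        rw [List.getElem?_drop, show i + (m - i) = m by omega]
        exact hceq
      have hij0 : ¬((i : Int) + f = -1) := by omega
      have hk : PySem.Chars.findFrom s ['>'] ((i : Int) + f) none =
          if PySem.Chars.find (s.drop jn) ['>'] = -1 then -1
          else (jn : Int) + PySem.Chars.find (s.drop jn) ['>'] := by
        rw [hj]; exact PySem.Chars.findFrom_natCast s ['>'] jn (le_of_lt hjlen)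
      set g := PySem.Chars.find (s.drop jn) ['>'] with hgdef
      by_cases hg1 : g = -1
      · -- '<' at jn but no closing '>': loop ends; result again the tail slice s[p:]
        rw [pvSfbLoop]
        simp only [if_neg hi0, hfi, if_neg hf1, if_neg hij0, hk, if_pos hg1,
          pvSfbLoop_neg_one]
        rw [pvSegs_tail s p hps]
        have hA1 : ∀ c ∈ (s.drop p).take (jn - p), c ≠ '<' := by
          intro c hc hceq
          subst hceq
          obtain ⟨idx, h1, h2, h3⟩ := pvMemTake s p jn '<' hc
          exact hming idx (by omega) h2 h3
        have hnoclose : ∀ c ∈ s.drop (jn + 1), c ≠ '>' := by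
          intro c hc hceq
          subst hceq
          apply pvFind_none _ _ hg1
          have : s.drop (jn + 1) = (s.drop jn).drop 1 := by rw [List.drop_drop]
          rw [this] at hc
          exact List.mem_of_mem_drop hc
        have hgetj : s[jn] = '<' := by
          have := List.getElem?_eq_getElem hjlen
          rw [this] at hsj; exact Option.some.inj hsj
        conv_rhs => rw [pvDecomp s p jn hpj hjlen]
        rw [pvStrip_append_no_open hA1, hgetj, pvStrip_open, pvCut_no_close hnoclose]
        rw [← hgetj]
        exact pvDecomp s p jn hpj hjlen
      · obtain ⟨hg0, hgat, hgmin⟩ := pvFind_found (s.drop jn) '>' hg1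
        set kn : Nat := jn + g.toNat with hkn
        have hsk : s[kn]? = some '>' := by
          rw [List.getElem?_drop] at hgat; exact hgat
        have hklen : kn < s.length := (List.getElem?_eq_some_iff.mp hsk).1
        have hjk : jn < kn := by
          have hne : jn ≠ kn := by
            intro he
            rw [← he] at hsk
            rw [hsj] at hsk
            simp at hsk
          omega
        have hgming : ∀ m, jn ≤ m → m < kn → s[m]? ≠ some '>' := by
          intro m h1 h2 hceq
          apply hgmin (m - jn) (by omega)
          rw [List.getElem?_drop, show jn + (m - jn) = m by omega]
          exact hceq
        have hkj : (jn : Int) + g = (kn : Int) := by omega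
        obtain ⟨fuel', rfl⟩ : ∃ fuel', fuel = fuel' + 1 := ⟨fuel - 1, by omega⟩
        obtain ⟨hr1, hr2⟩ := pvSfbLoop_ne_nil s fuel' ((kn : Nat) : Int) (by omega)
        have hk2 : PySem.Chars.findFrom s ['>'] ((i : Int) + f) none = (kn : Int) := by
          rw [hk, if_neg hg1]; exact hkj
        rw [pvSfbLoop]
        simp only [if_neg hi0, hfi, if_neg hf1, if_neg hij0, hk2]
        rw [hj]
        -- unfold one pvSegs layer
        have hseg : pvSegs s p (((jn : Int) :: (pvSfbLoop s (fuel' + 1) (kn : Int)).1,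
            (kn : Int) :: (pvSfbLoop s (fuel' + 1) (kn : Int)).2)) =
            (s.drop p).take (jn - p) ++ pvSegs s (kn + 1) (pvSfbLoop s (fuel' + 1) (kn : Int)) := by
          simp only [pvSegs, pvSetLast]
          rw [List.dropLast_cons_of_ne_nil hr1, List.dropLast_cons_of_ne_nil hr2]
          simp only [List.cons_append, List.zip_cons_cons, List.flatMap_cons]
          rw [show ((p : Int) - 1 + 1) = (p : Int) by ring]
          rw [PySem.List.slice_natCast]
          congr 2
          rw [show (((kn + 1 : Nat) : Int) - 1) = (kn : Int) by push_cast; ring]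
        rw [hseg]
        rw [ih s (kn + 1) kn (by omega) (by omega)
          (fun m h1 h2 hceq => by
            rw [show m = kn by omega] at hceq
            rw [hsk] at hceq
            simp at hceq)
          (by omega)]
        -- assemble the right-hand side
        have hA1 : ∀ c ∈ (s.drop p).take (jn - p), c ≠ '<' := by
          intro c hc hceq
          subst hceq
          obtain ⟨idx, h1, h2, h3⟩ := pvMemTake s p jn '<' hc
          exact hming idx (by omega) h2 h3
        have hA2 : ∀ c ∈ (s.drop (jn + 1)).take (kn - (jn + 1)), c ≠ '>' := by
          intro c hc hceq
          subst hceq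
          obtain ⟨idx, h1, h2, h3⟩ := pvMemTake s (jn + 1) kn '>' hc
          exact hgming idx (by omega) h2 h3
        have hgetj : s[jn] = '<' := by
          have := List.getElem?_eq_getElem hjlen
          rw [this] at hsj; exact Option.some.inj hsj
        have hgetk : s[kn] = '>' := by
          have := List.getElem?_eq_getElem hklen
          rw [this] at hsk; exact Option.some.inj hsk
        have hcut : pvCut (s.drop (jn + 1)) = some (s.drop (kn + 1)) := by
          conv_lhs => rw [pvDecomp s (jn + 1) kn (by omega) hklen]
          rw [hgetk]
          exact pvCut_append_close hA2
        conv_rhs => rw [pvDecomp s p jn hpj hjlen]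
        rw [pvStrip_append_no_open hA1, hgetj, pvStrip_open, hcut]


theorem pvA_eq_strip (document : String) :
    transform_document document = String.ofList (pvStrip document.toList) := by
  obtain ⟨h1, h2⟩ := pvSfbLoop_ne_nil document.toList (document.toList.length + 1) 0 (by omega)
  have hm := pvMain (document.toList.length + 2) document.toList 0 0 (le_refl 0)
    (by omega) (by omega) (by omega)
  simp only [pvSegs, Nat.cast_zero, zero_sub, List.drop_zero] at hm
  simp only [transform_document, search_for_braces, PySem.List.foldl_append_eq_flatMap]
  rw [List.dropLast_cons_of_ne_nil h2]
  rw [List.nil_append]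
  show String.ofList
      (List.flatMap (fun x => PySem.List.slice document.toList (some (x.2 + 1)) (some x.1))
        ((pvSetLast (pvSfbLoop document.toList (document.toList.length + 2) 0).1 ↑document.toList.length).zip
          (-1 :: (pvSfbLoop document.toList (document.toList.length + 2) 0).2.dropLast))) =
    String.ofList (pvStrip document.toList)
  exact congrArg String.ofList hm

theorem pvB_eq_strip (document : String) :
    transform_document_alt document = String.ofList (pvStrip document.toList) := by
  unfold transform_document_alt
  have := (pvAlt_run document.toList).1 []
  rcases h : (document.toList.foldl pvAltStep ([], none)).2 with _ | pnd
  · simp only [h]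
    rw [pvFin] at this
    rw [h] at this
    simp at this
    rw [this]
  · simp only [h]
    rw [pvFin] at this
    rw [h] at this
    simp at this
    rw [this]

-- ===== VERDICT (by name: the statement is the Claim_ definition above) =====
theorem transform_document_spec : Claim_equal_transform_document := by
  intro document _
  unfold Spec_transform_document
  rw [pvA_eq_strip, pvB_eq_strip]
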